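-- pv_equiv track=rewrite | github.com/harikiran138/lumina-ai-learning | backend/services/analytics_service.py | _generate_anomaly_recommendations
-- ===== SOURCE A (Python) =====
-- from typing import List, Dict, Any, Optional
--
-- def _generate_anomaly_recommendations(anomalies: List[Dict[str, Any]]) -> List[Dict[str, Any]]:
--     """Generate recommendations based on detected anomalies."""
--     recommendations = []
--
--     if not anomalies:
--         return [{
--             "type": "positive",
--             "message": "No significant learning anomalies detected",
--             "action": "Continue with current learning approach"
--         }]
--
--     # Analyze patterns in anomalies
--     brief_sessions = sum(1 for a in anomalies if a["type"] == "brief_engagement")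
--     incomplete_activities = sum(1 for a in anomalies if a["type"] == "incomplete_activity")
--     extended_sessions = sum(1 for a in anomalies if a["type"] == "extended_session")
--
--     if brief_sessions > 0:
--         recommendations.append({
--             "type": "engagement",
--             "message": f"Detected {brief_sessions} unusually brief learning sessions",
--             "action": "Schedule regular study time blocks of at least 25-30 minutes"
--         })
--
--     if incomplete_activities > 0:
--         recommendations.append({
--             "type": "completion",
--             "message": f"Found {incomplete_activities} incomplete activities",
--             "action": "Review incomplete activities and identify any obstacles to completion"
--         })
--
--     if extended_sessions > 0:
--         recommendations.append({
--             "type": "pacing",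
--             "message": f"Noticed {extended_sessions} extended learning sessions",
--             "action": "Consider breaking long sessions into smaller, focused study periods"
--         })
--
--     return recommendations
-- ===== SOURCE B (Python) =====
-- # Table-driven rewrite: one counting pass over anomalies, then ONE loop over a
-- # declarative SPEC table emits recommendations (no per-type scans, no three
-- # hard-coded if-blocks).
-- _SPEC = [
--     ("brief_engagement", "engagement",
--      "Detected ", " unusually brief learning sessions",
--      "Schedule regular study time blocks of at least 25-30 minutes"),
--     ("incomplete_activity", "completion",
--      "Found ", " incomplete activities",
--      "Review incomplete activities and identify any obstacles to completion"),
--     ("extended_session", "pacing",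
--      "Noticed ", " extended learning sessions",
--      "Consider breaking long sessions into smaller, focused study periods"),
-- ]
--
-- def _generate_anomaly_recommendations(anomalies):
--     """Generate recommendations based on detected anomalies."""
--     if not anomalies:
--         return [{
--             "type": "positive",
--             "message": "No significant learning anomalies detected",
--             "action": "Continue with current learning approach"
--         }]
--     counts = {}
--     for a in anomalies:
--         t = a["type"]
--         counts[t] = counts.get(t, 0) + 1
--     return [
--         {"type": rec_type, "message": pre + str(c) + suf, "action": action}
--         for key, rec_type, pre, suf, action in _SPEC
--         if (c := counts.get(key, 0)) > 0
--     ]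
-- ===== Notes on version B (the rewrite author's own statement) =====
-- stated objective: alternative
-- what changed: Replaces A's three separate sum() scans and three hard-coded if/append blocks with one counting pass plus a single data-driven loop over a declarative spec table of (anomaly type, recommendation template) entries.
import Mathlib
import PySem

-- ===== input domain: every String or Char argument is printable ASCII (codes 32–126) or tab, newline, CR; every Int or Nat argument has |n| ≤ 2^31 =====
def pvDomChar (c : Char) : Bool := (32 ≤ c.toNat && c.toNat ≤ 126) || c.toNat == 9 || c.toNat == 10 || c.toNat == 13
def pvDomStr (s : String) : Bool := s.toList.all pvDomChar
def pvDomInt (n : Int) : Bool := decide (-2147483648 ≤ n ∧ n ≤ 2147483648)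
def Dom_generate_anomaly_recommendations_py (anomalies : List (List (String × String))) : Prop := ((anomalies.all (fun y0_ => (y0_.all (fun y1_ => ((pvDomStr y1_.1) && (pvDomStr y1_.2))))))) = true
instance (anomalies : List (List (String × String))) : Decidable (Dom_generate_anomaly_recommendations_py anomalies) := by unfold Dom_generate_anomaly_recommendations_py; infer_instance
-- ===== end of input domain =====

-- B replaces A's three sum() scans and three hard-coded if/append blocks by one counting pass plus one data-driven loop over a spec table; return value only.

-- ===== PORT A =====
def generate_anomaly_recommendations_py (anomalies : List (List (String × String))) : List (List (String × String)) :=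
  if anomalies = [] then
    [[("type", "positive"),
      ("message", "No significant learning anomalies detected"),
      ("action", "Continue with current learning approach")]]
  else
    let recommendations : List (List (String × String)) := []
    let brief_sessions : Int := (anomalies.countP (fun a => (PySem.Dict.mk a).get? "type" == some "brief_engagement") : Int)
    let incomplete_activities : Int := (anomalies.countP (fun a => (PySem.Dict.mk a).get? "type" == some "incomplete_activity") : Int)
    let extended_sessions : Int := (anomalies.countP (fun a => (PySem.Dict.mk a).get? "type" == some "extended_session") : Int)
    let recommendations := if brief_sessions > 0 then recommendations ++
      [[("type", "engagement"),
        ("message", "Detected " ++ PySem.Int.toStr brief_sessions ++ " unusually brief learning sessions"),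
        ("action", "Schedule regular study time blocks of at least 25-30 minutes")]] else recommendations
    let recommendations := if incomplete_activities > 0 then recommendations ++
      [[("type", "completion"),
        ("message", "Found " ++ PySem.Int.toStr incomplete_activities ++ " incomplete activities"),
        ("action", "Review incomplete activities and identify any obstacles to completion")]] else recommendations
    let recommendations := if extended_sessions > 0 then recommendations ++
      [[("type", "pacing"),
        ("message", "Noticed " ++ PySem.Int.toStr extended_sessions ++ " extended learning sessions"),
        ("action", "Consider breaking long sessions into smaller, focused study periods")]] else recommendations
    recommendations

-- ===== PORT B =====
-- the declarative spec table _SPEC from Source B: (anomaly key, rec type, msg prefix, msg suffix, action)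
def pvSpecTable : List (String × String × String × String × String) :=
  [("brief_engagement", "engagement",
    "Detected ", " unusually brief learning sessions",
    "Schedule regular study time blocks of at least 25-30 minutes"),
   ("incomplete_activity", "completion",
    "Found ", " incomplete activities",
    "Review incomplete activities and identify any obstacles to completion"),
   ("extended_session", "pacing",
    "Noticed ", " extended learning sessions",
    "Consider breaking long sessions into smaller, focused study periods")]

def generate_anomaly_recommendations_py_alt (anomalies : List (List (String × String))) : List (List (String × String)) :=
  if anomalies = [] then
    [[("type", "positive"),
      ("message", "No significant learning anomalies detected"),
      ("action", "Continue with current learning approach")]]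
  else
    -- one counting pass
    let counts : PySem.Dict (Option String) Int :=
      anomalies.foldl (fun d a =>
        let t := (PySem.Dict.mk a).get? "type"
        d.insert t (d.getD t 0 + 1)) PySem.Dict.empty
    -- one data-driven loop over the spec table (the comprehension in Source B)
    pvSpecTable.filterMap (fun e =>
      let c := counts.getD (some e.1) 0
      if c > 0 then
        some [("type", e.2.1),
              ("message", e.2.2.1 ++ PySem.Int.toStr c ++ e.2.2.2.1),
              ("action", e.2.2.2.2)]
      else none)

-- ===== PRECONDITION & SPEC =====
-- Pre_ excludes anomalies lacking the "type" key, on which Python A (and B) raise KeyError.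
def Pre_generate_anomaly_recommendations_py (anomalies : List (List (String × String))) : Prop :=
  (anomalies.all (fun a => (PySem.Dict.mk a).contains "type")) = true
instance (anomalies : List (List (String × String))) : Decidable (Pre_generate_anomaly_recommendations_py anomalies) := by unfold Pre_generate_anomaly_recommendations_py; infer_instance

def pvWitness_generate_anomaly_recommendations_py : (List (List (String × String))) :=
  [[("type", "brief_engagement")], [("type", "other"), ("k", "v")]]

def Spec_generate_anomaly_recommendations_py (anomalies : List (List (String × String))) (out : List (List (String × String))) : Prop := out = generate_anomaly_recommendations_py_alt anomalies
instance (anomalies : List (List (String × String))) (out : List (List (String × String))) : Decidable (Spec_generate_anomaly_recommendations_py anomalies out) := by unfold Spec_generate_anomaly_recommendations_py; infer_instance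

-- ===== CLAIM =====
def Claim_equal_generate_anomaly_recommendations_py : Prop := ∀ (anomalies : List (List (String × String))), Dom_generate_anomaly_recommendations_py anomalies → Pre_generate_anomaly_recommendations_py anomalies → Spec_generate_anomaly_recommendations_py anomalies (generate_anomaly_recommendations_py anomalies)

-- ===== LEMMAS AND PROOFS =====

-- B's counting-table read-out equals A's per-type scan count.
theorem freq_count_eq (xs : List (List (String × String))) (k : String) :
    (xs.foldl (fun d a =>
        d.insert ((PySem.Dict.mk a).get? "type")
          (d.getD ((PySem.Dict.mk a).get? "type") 0 + 1))
        (PySem.Dict.empty : PySem.Dict (Option String) Int)).getD (some k) 0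
      = (xs.countP (fun a => (PySem.Dict.mk a).get? "type" == some k) : Int) := by
  have h1 : xs.foldl (fun d a =>
        d.insert ((PySem.Dict.mk a).get? "type")
          (d.getD ((PySem.Dict.mk a).get? "type") 0 + 1))
        (PySem.Dict.empty : PySem.Dict (Option String) Int)
      = (xs.map (fun a => (PySem.Dict.mk a).get? "type")).foldl
          (fun d t => d.insert t (d.getD t 0 + 1)) PySem.Dict.empty :=
    by rw [List.foldl_map]
  rw [h1, PySem.Dict.foldl_insert_getD_add_one_eq_counter, PySem.Dict.getD_counter]
  simp only [List.count, List.countP_map]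
  rfl

-- ===== VERDICT =====
theorem generate_anomaly_recommendations_py_spec : Claim_equal_generate_anomaly_recommendations_py := by
  intro anomalies _ _
  unfold Spec_generate_anomaly_recommendations_py
  unfold generate_anomaly_recommendations_py generate_anomaly_recommendations_py_alt
  by_cases h : anomalies = []
  · simp [h]
  · simp only [h, pvSpecTable, List.filterMap, freq_count_eq]
    split_ifs <;> simp
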